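-- pv_equiv track=rewrite | github.com/YiJia-Zhu/HybridLatent | CODI/src/model_adaptive.py | pad_steps
-- ===== SOURCE A (Python) =====
-- from typing import Optional, List, Tuple, Dict, Sequence, Iterable, Union
--
-- def pad_steps(
--     step_list,
--     pad_id: int = 128256
-- ):
--     max_len = max(len(step) for steps in step_list for step in steps)
--     # 最大的 step 数量
--     S_max = max(len(steps) for steps in step_list)
--     # 全局最长的 step 长度
--     L_max = max(len(step) for steps in step_list for step in steps)
--
--     result: List[List[List[int]]] = []
--     for steps in step_list:
--         padded_steps: List[List[int]] = []
--         for step in steps: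
--             cur = list(step)
--             pad_len = L_max - len(cur)
--             if pad_len > 0:
--                 cur = cur + [pad_id] * pad_len
--             padded_steps.append(cur)
--         while len(padded_steps) < S_max:
--             padded_steps.append([pad_id] * L_max)
--         result.append(padded_steps)
--
--     return result
-- ===== SOURCE B (Python) =====
-- def pad_steps(
--     step_list,
--     pad_id: int = 128256
-- ):
--     # Eager maxima (raise ValueError on empty input exactly like the original).
--     S_max = max(len(steps) for steps in step_list)
--     L_max = max(len(step) for steps in step_list for step in steps)
--     # Sparse COO index of the actual data, built in one pass.
--     coo = {}
--     for i, steps in enumerate(step_list):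
--         for j, step in enumerate(steps):
--             for k, v in enumerate(step):
--                 coo[(i, j, k)] = v
--     # Densify: enumerate the full output coordinate cube, looking each cell up
--     # in the sparse index with pad_id as the default.
--     return [[[coo.get((i, j, k), pad_id) for k in range(L_max)]
--              for j in range(S_max)]
--             for i in range(len(step_list))]
-- ===== Notes on version B (the rewrite author's own statement) =====
-- stated objective: alternative
-- what changed: B builds a sparse COO dictionary {(i,j,k): value} of the actual data in one pass and then densifies it by enumerating the full output coordinate cube with a defaulting lookup, instead of A's per-step pad-suffix computation plus a while-loop appending filler rows.
import Mathlib
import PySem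

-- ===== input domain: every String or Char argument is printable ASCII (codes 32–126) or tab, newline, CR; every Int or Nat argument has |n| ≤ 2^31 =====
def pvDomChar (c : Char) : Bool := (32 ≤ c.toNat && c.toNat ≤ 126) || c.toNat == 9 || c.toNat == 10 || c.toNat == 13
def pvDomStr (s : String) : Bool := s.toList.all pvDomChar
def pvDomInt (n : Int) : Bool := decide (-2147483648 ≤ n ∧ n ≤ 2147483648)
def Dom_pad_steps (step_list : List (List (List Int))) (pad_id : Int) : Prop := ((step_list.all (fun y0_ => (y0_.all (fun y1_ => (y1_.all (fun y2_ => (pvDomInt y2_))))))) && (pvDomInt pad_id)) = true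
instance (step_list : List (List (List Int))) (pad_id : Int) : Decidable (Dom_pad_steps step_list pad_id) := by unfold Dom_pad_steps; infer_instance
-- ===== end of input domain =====

-- B builds a sparse COO dictionary {(i,j,k): value} of the actual data in one pass and then
-- densifies it by enumerating the full output coordinate cube with a defaulting lookup,
-- instead of A's per-step pad-suffix computation plus a while-loop appending filler rows. Same cost.

-- ===== PORT A =====
-- Python: while len(padded_steps) < S_max: padded_steps.append([pad_id] * L_max)
def padFillWhile (padded : List (List Int)) (S L : Nat) (pad : Int) : List (List Int) :=
  if _h : padded.length < S then
    padFillWhile (padded ++ [List.replicate L pad]) S L pad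
  else
    padded
termination_by S - padded.length
decreasing_by simp; omega

def pad_steps (step_list : List (List (List Int))) (pad_id : Int) : List (List (List Int)) :=
  -- max(...) over a nonempty list of lengths equals foldl max 0; the empty case (Python ValueError)
  -- is excluded by Pre_pad_steps.
  let _max_len := (step_list.flatMap (fun steps => steps.map (·.length))).foldl max 0
  let S_max := (step_list.map (·.length)).foldl max 0
  let L_max := (step_list.flatMap (fun steps => steps.map (·.length))).foldl max 0
  step_list.map (fun steps =>
    let padded_steps := steps.map (fun step =>
      let pad_len := L_max - step.length
      if pad_len > 0 then step ++ List.replicate pad_len pad_id else step)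
    padFillWhile padded_steps S_max L_max pad_id)

-- ===== PORT B =====
def pad_steps_alt (step_list : List (List (List Int))) (pad_id : Int) : List (List (List Int)) :=
  let S_max : Nat := (step_list.map (·.length)).foldl max 0
  let L_max : Nat := (step_list.flatMap (fun steps => steps.map (·.length))).foldl max 0
  -- coo = {}; for i,steps: for j,step: for k,v: coo[(i,j,k)] = v
  let coo : PySem.Dict (Int × Int × Int) Int :=
    (PySem.List.enumerate step_list).foldl (fun d p =>
      (PySem.List.enumerate p.2).foldl (fun d q =>
        (PySem.List.enumerate q.2).foldl (fun d r =>
          d.insert (p.1, q.1, r.1) r.2) d) d) PySem.Dict.empty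
  -- [[[coo.get((i,j,k), pad_id) for k in range(L_max)] for j in range(S_max)] for i in range(len(step_list))]
  (PySem.List.pyRange 0 (step_list.length : Int)).map (fun i =>
    (PySem.List.pyRange 0 (S_max : Int)).map (fun j =>
      (PySem.List.pyRange 0 (L_max : Int)).map (fun k =>
        coo.getD (i, j, k) pad_id)))

-- ===== PRECONDITION & SPEC =====
-- Pre_ excludes exactly the inputs where Python A raises ValueError (max of an empty generator):
-- step_list with no non-empty block. Python B raises ValueError there too.
def Pre_pad_steps (step_list : List (List (List Int))) (pad_id : Int) : Prop :=
  step_list.flatMap id ≠ []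
instance (step_list : List (List (List Int))) (pad_id : Int) : Decidable (Pre_pad_steps step_list pad_id) := by unfold Pre_pad_steps; infer_instance

def pvWitness_pad_steps : List (List (List Int)) × Int := ([[[1, 2], [3]], [[4]]], 9)

def Spec_pad_steps (step_list : List (List (List Int))) (pad_id : Int) (out : List (List (List Int))) : Prop := out = pad_steps_alt step_list pad_id
instance (step_list : List (List (List Int))) (pad_id : Int) (out : List (List (List Int))) : Decidable (Spec_pad_steps step_list pad_id out) := by unfold Spec_pad_steps; infer_instance

-- ===== CLAIM =====
def Claim_equal_pad_steps : Prop := ∀ (step_list : List (List (List Int))) (pad_id : Int), Dom_pad_steps step_list pad_id → Pre_pad_steps step_list pad_id → Spec_pad_steps step_list pad_id (pad_steps step_list pad_id)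

-- ===== LEMMAS AND PROOFS =====

-- The flat list of ((i,j,k), value) insertions that B's triple loop performs, in order.
def cooList (step_list : List (List (List Int))) : List ((Int × Int × Int) × Int) :=
  (PySem.List.enumerate step_list).flatMap (fun p =>
    (PySem.List.enumerate p.2).flatMap (fun q =>
      (PySem.List.enumerate q.2).map (fun r => ((p.1, q.1, r.1), r.2))))

theorem coo_eq_foldl_cooList (step_list : List (List (List Int))) :
    ((PySem.List.enumerate step_list).foldl (fun d p =>
      (PySem.List.enumerate p.2).foldl (fun d q =>
        (PySem.List.enumerate q.2).foldl (fun d r =>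
          d.insert (p.1, q.1, r.1) r.2) d) d) PySem.Dict.empty)
    = (cooList step_list).foldl (fun d pr => d.insert pr.1 pr.2) PySem.Dict.empty := by
  simp [cooList, List.foldl_flatMap, List.foldl_map]

theorem mem_cooList (step_list : List (List (List Int))) (key : Int × Int × Int) (v : Int) :
    (key, v) ∈ cooList step_list ↔
      ∃ (i j k : Nat), key = ((i : Int), (j : Int), (k : Int)) ∧
        (step_list[i]?.bind (fun b => b[j]?)).bind (fun r => r[k]?) = some v := by
  simp only [cooList, List.mem_flatMap, List.mem_map, PySem.List.mem_enumerate_iff]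
  constructor
  · rintro ⟨p, ⟨i, hi, rfl⟩, q, ⟨j, hj, rfl⟩, r, ⟨k, hk, rfl⟩, heq⟩
    simp only [zero_add] at heq
    obtain ⟨h1, h2⟩ := Prod.mk.injEq .. ▸ heq
    refine ⟨i, j, k, h1.symm, ?_⟩
    simp [hi, hj, hk, ← h2]
  · rintro ⟨i, j, k, rfl, hsome⟩
    have hi : i < step_list.length := by
      by_contra h
      simp [List.getElem?_eq_none (by omega : step_list.length ≤ i)] at hsome
    have hj : j < step_list[i].length := by
      by_contra h
      simp [List.getElem?_eq_getElem hi,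
        List.getElem?_eq_none (by omega : step_list[i].length ≤ j)] at hsome
    have hk : k < step_list[i][j].length := by
      by_contra h
      simp [hi, hj, List.getElem?_eq_none (by omega : step_list[i][j].length ≤ k)] at hsome
    refine ⟨(i, step_list[i]), ⟨i, hi, by simp⟩, (j, step_list[i][j]), ⟨j, hj, by simp⟩,
      (k, step_list[i][j][k]), ⟨k, hk, by simp⟩, ?_⟩
    simp [hi, hj, hk] at hsome
    simp [hsome]

theorem nodup_cooList_keys (step_list : List (List (List Int))) :
    ((cooList step_list).map Prod.fst).Nodup := by
  simp only [cooList, List.map_flatMap, List.map_map]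
  rw [List.nodup_flatMap]
  constructor
  · intro p hp
    rw [List.nodup_flatMap]
    constructor
    · intro q hq
      refine List.Pairwise.map _ ?_ (PySem.List.pairwise_lt_enumerate q.2 0)
      intro a b hab h
      have : a.1 = b.1 := by
        have := congrArg (fun z => z.2.2) h
        simpa using this
      omega
    · have := PySem.List.pairwise_lt_enumerate p.2 0
      refine this.imp ?_
      intro a b hab x hx hy
      simp only [List.mem_map, Function.comp] at hx hy
      obtain ⟨r, _, rfl⟩ := hx
      obtain ⟨r', _, h⟩ := hy
      have : a.1 = b.1 := by
        have := congrArg (fun z => z.2.1) h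
        simpa using this.symm
      omega
  · have := PySem.List.pairwise_lt_enumerate step_list 0
    refine this.imp ?_
    intro a b hab x hx hy
    simp only [List.mem_flatMap, List.mem_map, Function.comp] at hx hy
    obtain ⟨q, _, r, _, rfl⟩ := hx
    obtain ⟨q', _, r', _, h⟩ := hy
    have : a.1 = b.1 := by
      have := congrArg (fun z => z.1) h
      simpa using this.symm
    omega

theorem items_coo (step_list : List (List (List Int))) :
    ((cooList step_list).foldl (fun d pr => d.insert pr.1 pr.2)
      (PySem.Dict.empty : PySem.Dict (Int × Int × Int) Int)).items = cooList step_list := by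
  have h := PySem.Dict.items_foldl_insert_fresh (cooList step_list) Prod.fst Prod.snd
    (PySem.Dict.empty : PySem.Dict (Int × Int × Int) Int)
    (fun a _ => by simp [PySem.Dict.contains_empty]) (nodup_cooList_keys step_list)
  simpa using h

theorem getD_coo (step_list : List (List (List Int))) (pad : Int) (i j k : Nat) :
    ((cooList step_list).foldl (fun d pr => d.insert pr.1 pr.2) PySem.Dict.empty).getD
        ((i : Int), (j : Int), (k : Int)) pad
    = ((step_list[i]?.bind (fun b => b[j]?)).bind (fun r => r[k]?)).getD pad := by
  set d := (cooList step_list).foldl (fun d pr => d.insert pr.1 pr.2)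
    (PySem.Dict.empty : PySem.Dict (Int × Int × Int) Int) with hd
  have hitems : d.items = cooList step_list := items_coo step_list
  have hkeys : d.keys.Nodup := by
    show (d.items.map (·.1)).Nodup
    rw [hitems]; exact nodup_cooList_keys step_list
  cases ho : (step_list[i]?.bind (fun b => b[j]?)).bind (fun r => r[k]?) with
  | some v =>
    have hmem : (((i : Int), (j : Int), (k : Int)), v) ∈ d.items := by
      rw [hitems, mem_cooList]; exact ⟨i, j, k, rfl, ho⟩
    simp [PySem.Dict.getD_of_mem_items d hmem hkeys]
  | none =>
    have hnc : d.contains ((i : Int), (j : Int), (k : Int)) = false := by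
      by_contra h
      have hc : d.contains ((i : Int), (j : Int), (k : Int)) = true :=
        Bool.ne_false_iff.mp h
      have hmemk := (PySem.Dict.contains_iff_mem_keys d _).mp hc
      have : ∃ pr ∈ d.items, pr.1 = ((i : Int), (j : Int), (k : Int)) := by
        simpa [PySem.Dict.keys, List.mem_map] using hmemk
      obtain ⟨pr, hpr, hfst⟩ := this
      have hmem2 : (((i : Int), (j : Int), (k : Int)), pr.2) ∈ cooList step_list := by
        rw [← hfst]
        have hpe : (pr.1, pr.2) = pr := rfl
        rw [hpe, ← hitems]; exact hpr
      obtain ⟨i', j', k', hkey, hsome⟩ := (mem_cooList _ _ _).mp hmem2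
      have hi : i' = i := by
        have := congrArg (fun z => z.1) hkey; simp at this; omega
      have hj : j' = j := by
        have := congrArg (fun z => z.2.1) hkey; simp at this; omega
      have hk : k' = k := by
        have := congrArg (fun z => z.2.2) hkey; simp at this; omega
      rw [hi, hj, hk] at hsome
      rw [ho] at hsome
      simp at hsome
    simp [PySem.Dict.getD_of_not_contains d pad hnc]

theorem le_foldl_max' (l : List Nat) (a : Nat) : a ≤ l.foldl max a := by
  induction l generalizing a with
  | nil => exact le_refl a
  | cons h t ih => exact le_trans (le_max_left a h) (ih (max a h))

theorem mem_le_foldl_max {x : Nat} : ∀ (l : List Nat) (a : Nat), x ∈ l → x ≤ l.foldl max a := by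
  intro l
  induction l with
  | nil => intro a hx; cases hx
  | cons h t ih =>
    intro a hx
    rcases List.mem_cons.mp hx with rfl | hmem
    · exact le_trans (le_max_right a x) (le_foldl_max' t (max a x))
    · exact ih (max a h) hmem

-- The while loop appends filler rows until length S.
theorem padFillWhile_eq (S L : Nat) (pad : Int) :
    ∀ n (padded : List (List Int)), S - padded.length = n →
    padFillWhile padded S L pad
      = padded ++ List.replicate (S - padded.length) (List.replicate L pad) := by
  intro n
  induction n with
  | zero =>
    intro padded h
    rw [padFillWhile]
    have : ¬ padded.length < S := by omega
    simp [this, h]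
  | succ n ih =>
    intro padded h
    rw [padFillWhile]
    have hlt : padded.length < S := by omega
    simp only [hlt, dif_pos]
    rw [ih (padded ++ [List.replicate L pad]) (by simp; omega)]
    have h1 : S - padded.length = (S - (padded ++ [List.replicate L pad]).length) + 1 := by
      simp; omega
    rw [h1, List.replicate_succ, List.append_assoc]
    rfl

theorem pad_steps_spec : Claim_equal_pad_steps := by
  intro step_list pad_id _dom _pre
  unfold Spec_pad_steps pad_steps pad_steps_alt
  simp only [coo_eq_foldl_cooList]
  set S_max := (step_list.map (·.length)).foldl max 0 with hS
  set L_max := (step_list.flatMap (fun steps => steps.map (·.length))).foldl max 0 with hL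
  rw [PySem.List.pyRange_zero_natCast step_list.length, List.map_map,
      PySem.List.pyRange_zero_natCast S_max, PySem.List.pyRange_zero_natCast L_max]
  apply List.ext_getElem
  · simp
  intro i hi hi'
  simp only [List.getElem_map, List.getElem_range, Function.comp_def]
  have hi0 : i < step_list.length := by simpa using hi
  rw [padFillWhile_eq S_max L_max pad_id (S_max - (step_list[i].map _).length) _ rfl]
  simp only [List.map_map, Function.comp_def]
  have hSle : step_list[i].length ≤ S_max :=
    mem_le_foldl_max _ 0 (List.mem_map.mpr ⟨step_list[i], List.getElem_mem hi0, rfl⟩)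
  apply List.ext_getElem
  · simp; omega
  intro j hj hj2
  have hjS : j < S_max := by simpa using hj2
  simp only [List.getElem_map, List.getElem_range]
  by_cases hjs : j < step_list[i].length
  · rw [List.getElem_append_left (by simpa using hjs)]
    simp only [List.getElem_map]
    have hLle : step_list[i][j].length ≤ L_max := by
      apply mem_le_foldl_max _ 0
      exact List.mem_flatMap.mpr ⟨step_list[i], List.getElem_mem hi0,
        List.mem_map.mpr ⟨step_list[i][j], List.getElem_mem hjs, rfl⟩⟩
    apply List.ext_getElem
    · by_cases hpos : L_max - step_list[i][j].length > 0
      · simp [hpos]; omega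
      · simp [hpos]; omega
    intro k hk hk2
    have hkL : k < L_max := by simpa using hk2
    simp only [List.getElem_map, List.getElem_range]
    rw [getD_coo]
    rw [List.getElem?_eq_getElem hi0]
    simp only [Option.bind_some]
    rw [List.getElem?_eq_getElem hjs]
    simp only [Option.bind_some]
    by_cases hks : k < step_list[i][j].length
    · rw [List.getElem?_eq_getElem hks]
      by_cases hpos : L_max - step_list[i][j].length > 0
      · simp only [hpos, if_pos]
        rw [List.getElem_append_left hks]
        simp
      · simp only [hpos]
        simp
    · rw [List.getElem?_eq_none (by omega : step_list[i][j].length ≤ k)]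
      have hpos : L_max - step_list[i][j].length > 0 := by omega
      simp only [hpos, if_pos]
      rw [List.getElem_append_right (by omega : step_list[i][j].length ≤ k)]
      simp
  · rw [List.getElem_append_right (by simpa using not_lt.mp hjs)]
    rw [List.getElem_replicate]
    apply List.ext_getElem
    · simp
    intro k hk hk2
    simp only [List.getElem_map, List.getElem_range, List.getElem_replicate]
    rw [getD_coo]
    rw [List.getElem?_eq_getElem hi0]
    simp only [Option.bind_some]
    rw [List.getElem?_eq_none (by omega : step_list[i].length ≤ j)]
    simp
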